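-- pv_equiv track=rewrite | github.com/tannerstephens/advent-of-code | 2021/day1/run.py | count_window
-- ===== SOURCE A (Python) =====
-- def count_window(pi: list[int], comparison_size: int = 1) -> int:
--   c = 0
--
--   n = sum(pi[:comparison_size])
--
--   for i in range(len(pi) - comparison_size):
--     s = sum(pi[i+1:i+comparison_size+1])
--     c += s > n
--     n = s
--
--   return c
-- ===== SOURCE B (Python) =====
-- def count_window(pi: list[int], comparison_size: int = 1) -> int:
--   # sliding comparison: adjacent window sums differ only by the entering and
--   # leaving element, so window i+1 > window i  iff  pi[i+cs] > pi[i]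
--   return sum(b > a for a, b in zip(pi, pi[comparison_size:]))
-- ===== Notes on version B (the rewrite author's own statement) =====
-- stated objective: faster
-- what changed: Replaces the per-step O(w) re-summation of each window with the telescoping observation that consecutive window sums compare exactly as the entering vs leaving element, so B is a single zip pass with no inner sums.
-- outside the precondition, e.g. on count_window([1, 2], -1): A returns 0, B returns 1
import Mathlib
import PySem

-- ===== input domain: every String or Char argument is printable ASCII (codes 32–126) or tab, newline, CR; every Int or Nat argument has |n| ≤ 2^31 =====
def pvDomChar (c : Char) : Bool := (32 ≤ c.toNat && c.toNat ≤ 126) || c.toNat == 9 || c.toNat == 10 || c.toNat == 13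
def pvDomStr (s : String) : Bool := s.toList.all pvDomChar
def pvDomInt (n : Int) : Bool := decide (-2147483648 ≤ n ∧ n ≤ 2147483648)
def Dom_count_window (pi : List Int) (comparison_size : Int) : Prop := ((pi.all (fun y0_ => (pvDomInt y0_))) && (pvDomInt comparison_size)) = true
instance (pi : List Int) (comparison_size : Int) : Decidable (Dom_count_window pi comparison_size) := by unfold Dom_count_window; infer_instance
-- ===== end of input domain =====

-- B replaces A's per-step window re-summation by a single zip pass comparing the
-- entering element with the leaving element (telescoping of adjacent window sums).

-- ===== PORT A =====
def count_window (pi : List Int) (comparison_size : Int) : Int :=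
  -- c = 0; n = sum(pi[:comparison_size]); for i in range(len(pi)-comparison_size): s = sum(pi[i+1:i+comparison_size+1]); c += s > n; n = s
  ((PySem.List.pyRange 0 ((pi.length : Int) - comparison_size) 1).foldl
    (fun (st : Int × Int) i =>
      (st.1 + (if (PySem.List.slice pi (some (i + 1)) (some (i + comparison_size + 1))).sum > st.2 then (1 : Int) else 0),
       (PySem.List.slice pi (some (i + 1)) (some (i + comparison_size + 1))).sum))
    (0, (PySem.List.slice pi none (some comparison_size)).sum)).1

-- ===== PORT B =====
def count_window_alt (pi : List Int) (comparison_size : Int) : Int :=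
  -- sum(b > a for a, b in zip(pi, pi[comparison_size:]))
  ((pi.zip (PySem.List.slice pi (some comparison_size) none)).map
    (fun p => if p.2 > p.1 then (1 : Int) else 0)).sum

-- ===== PRECONDITION & SPEC =====
-- Pre_ excludes negative comparison_size: there Python's negative-slice wraparound makes
-- A's value accidental, and B's zip-based value on that nonsense window size is equally
-- unspecified (e.g. ([1,2],-1): A returns 0, B returns 1).
def Pre_count_window (pi : List Int) (comparison_size : Int) : Prop := 0 ≤ comparison_size
instance (pi : List Int) (comparison_size : Int) : Decidable (Pre_count_window pi comparison_size) := by unfold Pre_count_window; infer_instance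
def pvWitness_count_window : List Int × Int := ([1, 3, 2, 4], 2)

def Spec_count_window (pi : List Int) (comparison_size : Int) (out : Int) : Prop := out = count_window_alt pi comparison_size
instance (pi : List Int) (comparison_size : Int) (out : Int) : Decidable (Spec_count_window pi comparison_size out) := by unfold Spec_count_window; infer_instance

-- ===== CLAIM (what is proved, stated in full; the proofs are below) =====
def Claim_equal_count_window : Prop := ∀ (pi : List Int) (comparison_size : Int), Dom_count_window pi comparison_size → Pre_count_window pi comparison_size → Spec_count_window pi comparison_size (count_window pi comparison_size)

-- ===== LEMMAS AND PROOFS =====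

-- sum of the window of length k starting at m
def pvWin (pi : List Int) (k m : Nat) : Int := ((pi.drop m).take k).sum

-- count, over i ∈ [m, m+j), of [pi[i+k] > pi[i]]
def pvCnt (pi : List Int) (k m j : Nat) : Int :=
  ((List.range' m j).map (fun i => if pi.getD (i + k) 0 > pi.getD i 0 then (1 : Int) else 0)).sum

theorem pvWin_shift (pi : List Int) (k m : Nat) (h : m + k < pi.length) :
    pvWin pi k (m + 1) + pi.getD m 0 = pvWin pi k m + pi.getD (m + k) 0 := by
  rcases Nat.eq_zero_or_pos k with hk | hk
  · subst hk; simp [pvWin]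
  · have hm : m < pi.length := by omega
    obtain ⟨k', rfl⟩ : ∃ k', k = k' + 1 := ⟨k - 1, by omega⟩
    have hdm : pi.drop m = pi[m] :: pi.drop (m + 1) := List.drop_eq_getElem_cons hm
    have hlen : k' < (pi.drop (m + 1)).length := by simp [List.length_drop]; omega
    have h2 : pvWin pi (k' + 1) (m + 1) = pvWin pi k' (m + 1) + (pi.drop (m + 1))[k'] := by
      simpa [pvWin] using List.sum_take_succ (pi.drop (m + 1)) k' hlen
    have h3 : (pi.drop (m + 1))[k'] = pi[m + 1 + k'] := List.getElem_drop
    have h1 : pvWin pi (k' + 1) m = pi[m] + pvWin pi k' (m + 1) := by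
      unfold pvWin; rw [hdm, List.take_succ_cons, List.sum_cons]
    have hg1 : pi.getD m 0 = pi[m] := List.getD_eq_getElem pi 0 hm
    have hg2 : pi.getD (m + (k' + 1)) 0 = pi[m + 1 + k'] := by
      have : m + (k' + 1) = m + 1 + k' := by omega
      rw [this]; exact List.getD_eq_getElem pi 0 (by omega)
    rw [h2, h3, h1, hg1, hg2]; ring

theorem pvA_inv (pi : List Int) (k : Nat) :
    ∀ (j m : Nat) (c : Int), m + j + k ≤ pi.length →
    (List.range' m j).foldl
      (fun (st : Int × Int) (i : Nat) =>
        (st.1 + (if pvWin pi k (i + 1) > st.2 then (1 : Int) else 0), pvWin pi k (i + 1)))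
      (c, pvWin pi k m)
    = (c + pvCnt pi k m j, pvWin pi k (m + j)) := by
  intro j
  induction j with
  | zero => intro m c _; simp [pvCnt]
  | succ j ih =>
    intro m c hle
    rw [List.range'_succ, List.foldl_cons]
    have hcmp : (pvWin pi k (m + 1) > pvWin pi k m) ↔ (pi.getD (m + k) 0 > pi.getD m 0) := by
      have := pvWin_shift pi k m (by omega)
      omega
    have : (if pvWin pi k (m + 1) > pvWin pi k m then (1 : Int) else 0)
         = (if pi.getD (m + k) 0 > pi.getD m 0 then (1 : Int) else 0) :=
      if_congr hcmp rfl rfl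
    rw [this, ih (m + 1) _ (by omega), Prod.mk.injEq]
    constructor
    · simp [pvCnt, List.range'_succ]; ring
    · congr 1; omega

theorem pvB_eq (pi : List Int) (k : Nat) :
    ∀ (j m : Nat), pi.length = m + j + k →
    (((pi.drop m).zip (pi.drop (m + k))).map
      (fun p => if p.2 > p.1 then (1 : Int) else 0)).sum = pvCnt pi k m j := by
  intro j
  induction j with
  | zero =>
    intro m hlen
    have : pi.drop (m + k) = [] := List.drop_eq_nil_of_le (by omega)
    simp [this, pvCnt]
  | succ j ih =>
    intro m hlen
    have hm : m < pi.length := by omega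
    have hmk : m + k < pi.length := by omega
    have h1 : pi.drop m = pi[m] :: pi.drop (m + 1) := List.drop_eq_getElem_cons hm
    have h2 : pi.drop (m + k) = pi[m + k] :: pi.drop (m + k + 1) := List.drop_eq_getElem_cons hmk
    have h3 : m + k + 1 = (m + 1) + k := by omega
    rw [h1, h2, List.zip_cons_cons, List.map_cons, List.sum_cons, h3,
        ih (m + 1) (by omega)]
    have hg1 : pi.getD m 0 = pi[m] := List.getD_eq_getElem pi 0 hm
    have hg2 : pi.getD (m + k) 0 = pi[m + k] := List.getD_eq_getElem pi 0 hmk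
    simp [pvCnt, List.range'_succ, List.getD,
      List.getElem?_eq_getElem hm, List.getElem?_eq_getElem hmk]

-- ===== VERDICT (by name: the statement is the Claim_ definition above) =====
theorem count_window_spec : Claim_equal_count_window := by
  intro pi cs _ hpre
  unfold Spec_count_window count_window count_window_alt
  set L := pi.length with hL
  obtain ⟨k, rfl⟩ : ∃ k : Nat, cs = (k : Int) := ⟨cs.toNat, (Int.toNat_of_nonneg hpre).symm⟩
  -- B side
  rw [PySem.List.slice_from_natCast]
  have hB0 := pvB_eq pi k (L - k) 0
  -- A side initial value
  rw [PySem.List.slice_to_natCast]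
  by_cases hkL : k ≤ L
  · -- nonempty (or full) range
    have hN : (L : Int) - (k : Int) = ((L - k : Nat) : Int) := by omega
    rw [hN, PySem.List.pyRange_one]
    have hsub : ((((L - k : Nat) : Int)) - 0).toNat = L - k := by omega
    rw [hsub, List.foldl_map, List.range_eq_range']
    have hbody : ∀ (st : Int × Int) (i : Nat),
        (fun (st : Int × Int) (i : Int) =>
          (st.1 + (if (PySem.List.slice pi (some (i + 1)) (some (i + (k : Int) + 1))).sum > st.2 then (1 : Int) else 0),
           (PySem.List.slice pi (some (i + 1)) (some (i + (k : Int) + 1))).sum)) st ((0 : Int) + (i : Nat))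
        = (st.1 + (if pvWin pi k (i + 1) > st.2 then (1 : Int) else 0), pvWin pi k (i + 1)) := by
      intro st i
      have h1 : (0 : Int) + (i : Nat) + 1 = (((i + 1 : Nat)) : Int) := by push_cast; ring
      have h2 : (0 : Int) + (i : Nat) + (k : Int) + 1 = (((i + 1 : Nat)) : Int) + ((k : Nat) : Int) := by push_cast; ring
      simp only [h1, h2, PySem.List.slice_natCast_add]
      rfl
    have hinit : pi.take k = (pi.drop 0).take k := by simp
    rw [hinit]
    calc ((List.range' 0 (L - k)).foldl _ ((0 : Int), pvWin pi k 0)).1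
        = ((List.range' 0 (L - k)).foldl
            (fun (st : Int × Int) (i : Nat) =>
              (st.1 + (if pvWin pi k (i + 1) > st.2 then (1 : Int) else 0), pvWin pi k (i + 1)))
            ((0 : Int), pvWin pi k 0)).1 := by
          exact congrArg Prod.fst (PySem.List.foldl_congr_mem _ _ _ _ (fun st i _ => hbody st i))
      _ = 0 + pvCnt pi k 0 (L - k) := by rw [pvA_inv pi k (L - k) 0 0 (by omega)]
      _ = (((pi.drop 0).zip (pi.drop (0 + k))).map (fun p => if p.2 > p.1 then (1 : Int) else 0)).sum := by
          rw [hB0 (by omega)]; ring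
      _ = ((pi.zip (pi.drop k)).map (fun p => if p.2 > p.1 then (1 : Int) else 0)).sum := by simp
  · -- k > L: empty range on A's side, empty zip on B's side
    have hA : PySem.List.pyRange 0 ((L : Int) - (k : Int)) 1 = [] :=
      PySem.List.pyRange_one_eq_nil (by omega)
    have hB : pi.drop k = [] := List.drop_eq_nil_of_le (by omega)
    simp [hA, hB]
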